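-- pv_equiv track=rewrite | github.com/serghi127/what2eat | json_to_typescript_converter.py | _estimate_macros_fallback
-- ===== SOURCE A (Python) =====
-- from typing import List, Dict, Any
--
-- def _estimate_macros_fallback(ingredients: List[str], servings: int) -> Dict[str, int]:
--     """Fallback method for macro estimation when LLM is not available"""
--
--     total_calories = 0
--     total_protein = 0
--     total_carbs = 0
--     total_fat = 0
--     total_sugar = 0
--
--     for ingredient in ingredients:
--         ingredient_lower = ingredient.lower()
--
--         # High calorie ingredients
--         if any(word in ingredient_lower for word in ['oil', 'butter', 'cream', 'cheese']):
--             total_calories += 120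
--             total_fat += 12
--         elif any(word in ingredient_lower for word in ['pasta', 'rice', 'bread', 'flour']):
--             total_calories += 80
--             total_carbs += 18
--         elif any(word in ingredient_lower for word in ['meat', 'chicken', 'beef', 'pork', 'fish']):
--             total_calories += 100
--             total_protein += 20
--         elif any(word in ingredient_lower for word in ['sugar', 'honey', 'syrup', 'jam']):
--             total_calories += 60
--             total_sugar += 15
--         elif any(word in ingredient_lower for word in ['vegetable', 'onion', 'garlic', 'herb']):
--             total_calories += 15
--             total_carbs += 3
--         else:
--             total_calories += 40
--             total_protein += 2
--             total_carbs += 5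
--             total_fat += 1
--
--     # Calculate per serving
--     return {
--         'calories': max(total_calories // servings, 100),
--         'protein': max(total_protein // servings, 5),
--         'carbs': max(total_carbs // servings, 5),
--         'fat': max(total_fat // servings, 2),
--         'sugar': max(total_sugar // servings, 0)
--     }
-- ===== SOURCE B (Python) =====
-- # Staged re-implementation: map each ingredient to a category index, count
-- # ingredients per category, then compute totals by closed-form linear
-- # combinations of the counts (multiplication instead of repeated addition).
-- from typing import List, Dict
--
-- _GROUPS = [
--     ['oil', 'butter', 'cream', 'cheese'],
--     ['pasta', 'rice', 'bread', 'flour'],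
--     ['meat', 'chicken', 'beef', 'pork', 'fish'],
--     ['sugar', 'honey', 'syrup', 'jam'],
--     ['vegetable', 'onion', 'garlic', 'herb'],
-- ]
--
--
-- def _category(ingredient: str) -> int:
--     low = ingredient.lower()
--     for k, words in enumerate(_GROUPS):
--         if any(w in low for w in words):
--             return k
--     return 5
--
--
-- def _estimate_macros_fallback(ingredients: List[str], servings: int) -> Dict[str, int]:
--     cats = [_category(i) for i in ingredients]
--     n = [cats.count(k) for k in range(6)]
--     cal = 120 * n[0] + 80 * n[1] + 100 * n[2] + 60 * n[3] + 15 * n[4] + 40 * n[5]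
--     pro = 20 * n[2] + 2 * n[5]
--     carb = 18 * n[1] + 3 * n[4] + 5 * n[5]
--     fat = 12 * n[0] + 1 * n[5]
--     sug = 15 * n[3]
--     return {
--         'calories': max(cal // servings, 100),
--         'protein': max(pro // servings, 5),
--         'carbs': max(carb // servings, 5),
--         'fat': max(fat // servings, 2),
--         'sugar': max(sug // servings, 0),
--     }
-- ===== Notes on version B (the rewrite author's own statement) =====
-- stated objective: alternative
-- what changed: Replaces A's per-ingredient if/elif chain updating five running accumulators with staged passes: classify each ingredient to a category index, count ingredients per category, and obtain each total as a closed-form linear combination (multiplication by counts) instead of repeated additive accumulation.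
import Mathlib
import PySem

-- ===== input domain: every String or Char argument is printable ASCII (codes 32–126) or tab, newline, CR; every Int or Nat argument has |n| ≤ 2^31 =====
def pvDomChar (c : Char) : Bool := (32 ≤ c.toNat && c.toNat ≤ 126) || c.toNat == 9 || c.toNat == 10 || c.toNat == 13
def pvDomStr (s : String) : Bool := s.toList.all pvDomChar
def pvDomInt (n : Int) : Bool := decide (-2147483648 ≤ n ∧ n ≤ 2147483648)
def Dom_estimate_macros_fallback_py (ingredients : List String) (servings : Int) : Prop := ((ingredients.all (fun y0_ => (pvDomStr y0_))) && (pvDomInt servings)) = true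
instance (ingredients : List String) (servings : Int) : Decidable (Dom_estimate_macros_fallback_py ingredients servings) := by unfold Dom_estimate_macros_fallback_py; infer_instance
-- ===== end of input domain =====

-- B replaces A's per-ingredient if/elif accumulation with staged passes:
-- classify each ingredient to a category index, count per category, and
-- compute the totals as linear combinations of the counts (alternative, same cost).

-- ===== PORT A =====
-- loop body of A: updates the five running totals by the if/elif chain
def pvA_step (acc : Int × Int × Int × Int × Int) (ingredient : String) : Int × Int × Int × Int × Int :=
  let low := PySem.Str.lower ingredient
  let (c, p, b, f, s) := acc
  if ["oil", "butter", "cream", "cheese"].any (fun w => PySem.Str.isIn w low) then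
    (c + 120, p, b, f + 12, s)
  else if ["pasta", "rice", "bread", "flour"].any (fun w => PySem.Str.isIn w low) then
    (c + 80, p, b + 18, f, s)
  else if ["meat", "chicken", "beef", "pork", "fish"].any (fun w => PySem.Str.isIn w low) then
    (c + 100, p + 20, b, f, s)
  else if ["sugar", "honey", "syrup", "jam"].any (fun w => PySem.Str.isIn w low) then
    (c + 60, p, b, f, s + 15)
  else if ["vegetable", "onion", "garlic", "herb"].any (fun w => PySem.Str.isIn w low) then
    (c + 15, p, b + 3, f, s)
  else
    (c + 40, p + 2, b + 5, f + 1, s)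

def estimate_macros_fallback_py (ingredients : List String) (servings : Int) : List (String × Int) :=
  let totals := ingredients.foldl pvA_step (0, 0, 0, 0, 0)
  match totals with
  | (tc, tp, tb, tf, ts) =>
    [("calories", max (PySem.Int.floordiv tc servings) 100),
     ("protein", max (PySem.Int.floordiv tp servings) 5),
     ("carbs", max (PySem.Int.floordiv tb servings) 5),
     ("fat", max (PySem.Int.floordiv tf servings) 2),
     ("sugar", max (PySem.Int.floordiv ts servings) 0)]

-- ===== PORT B =====
def pvB_groups : List (List String) :=
  [["oil", "butter", "cream", "cheese"],
   ["pasta", "rice", "bread", "flour"],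
   ["meat", "chicken", "beef", "pork", "fish"],
   ["sugar", "honey", "syrup", "jam"],
   ["vegetable", "onion", "garlic", "herb"]]

-- the `for k, words in enumerate(_GROUPS): … return k` loop of _category
def pvB_find (low : String) : List (List String) → Nat
  | [] => 5
  | words :: rest =>
    if words.any (fun w => PySem.Str.isIn w low) then
      5 - (rest.length + 1)
    else pvB_find low rest

def pvB_category (ingredient : String) : Nat :=
  pvB_find (PySem.Str.lower ingredient) pvB_groups

def estimate_macros_fallback_py_alt (ingredients : List String) (servings : Int) : List (String × Int) :=
  let cats := ingredients.map pvB_category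
  let n : List Int := (List.range 6).map (fun k => (cats.count k : Int))
  let cal := 120 * n[0]! + 80 * n[1]! + 100 * n[2]! + 60 * n[3]! + 15 * n[4]! + 40 * n[5]!
  let pro := 20 * n[2]! + 2 * n[5]!
  let carb := 18 * n[1]! + 3 * n[4]! + 5 * n[5]!
  let fat := 12 * n[0]! + 1 * n[5]!
  let sug := 15 * n[3]!
  [("calories", max (PySem.Int.floordiv cal servings) 100),
   ("protein", max (PySem.Int.floordiv pro servings) 5),
   ("carbs", max (PySem.Int.floordiv carb servings) 5),
   ("fat", max (PySem.Int.floordiv fat servings) 2),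
   ("sugar", max (PySem.Int.floordiv sug servings) 0)]

-- ===== PRECONDITION & SPEC =====
-- Pre_ excludes servings = 0, where the Python A raises ZeroDivisionError.
def Pre_estimate_macros_fallback_py (ingredients : List String) (servings : Int) : Prop := servings ≠ 0
instance (ingredients : List String) (servings : Int) : Decidable (Pre_estimate_macros_fallback_py ingredients servings) := by unfold Pre_estimate_macros_fallback_py; infer_instance

def pvWitness_estimate_macros_fallback_py : List String × Int := (["olive oil", "Chicken"], 2)

def Spec_estimate_macros_fallback_py (ingredients : List String) (servings : Int) (out : List (String × Int)) : Prop := out = estimate_macros_fallback_py_alt ingredients servings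
instance (ingredients : List String) (servings : Int) (out : List (String × Int)) : Decidable (Spec_estimate_macros_fallback_py ingredients servings out) := by unfold Spec_estimate_macros_fallback_py; infer_instance

-- ===== CLAIM (what is proved, stated in full; the proofs are below) =====
def Claim_equal_estimate_macros_fallback_py : Prop := ∀ (ingredients : List String) (servings : Int), Dom_estimate_macros_fallback_py ingredients servings → Pre_estimate_macros_fallback_py ingredients servings → Spec_estimate_macros_fallback_py ingredients servings (estimate_macros_fallback_py ingredients servings)

-- ===== LEMMAS AND PROOFS =====

-- the macro delta of a category index (proof-side characterisation)
def pvDelta (k : Nat) : Int × Int × Int × Int × Int :=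
  match k with
  | 0 => (120, 0, 0, 12, 0)
  | 1 => (80, 0, 18, 0, 0)
  | 2 => (100, 20, 0, 0, 0)
  | 3 => (60, 0, 0, 0, 15)
  | 4 => (15, 0, 3, 0, 0)
  | _ => (40, 2, 5, 1, 0)

theorem pvB_category_le (ing : String) : pvB_category ing ≤ 5 := by
  simp only [pvB_category, pvB_groups, pvB_find]
  split_ifs <;> omega

-- A's loop body adds exactly the delta of B's category index
theorem pvA_step_eq_delta (acc : Int × Int × Int × Int × Int) (ing : String) :
    pvA_step acc ing =
      (acc.1 + (pvDelta (pvB_category ing)).1,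
       acc.2.1 + (pvDelta (pvB_category ing)).2.1,
       acc.2.2.1 + (pvDelta (pvB_category ing)).2.2.1,
       acc.2.2.2.1 + (pvDelta (pvB_category ing)).2.2.2.1,
       acc.2.2.2.2 + (pvDelta (pvB_category ing)).2.2.2.2) := by
  obtain ⟨c, p, b, f, s⟩ := acc
  simp only [pvA_step, pvB_category, pvB_groups, pvB_find]
  split_ifs <;> simp [pvDelta]

-- A's fold equals the initial state plus the componentwise sums of the deltas
theorem pvA_fold_eq (ings : List String) (acc : Int × Int × Int × Int × Int) :
    ings.foldl pvA_step acc =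
      (acc.1 + ((ings.map pvB_category).map (fun k => (pvDelta k).1)).sum,
       acc.2.1 + ((ings.map pvB_category).map (fun k => (pvDelta k).2.1)).sum,
       acc.2.2.1 + ((ings.map pvB_category).map (fun k => (pvDelta k).2.2.1)).sum,
       acc.2.2.2.1 + ((ings.map pvB_category).map (fun k => (pvDelta k).2.2.2.1)).sum,
       acc.2.2.2.2 + ((ings.map pvB_category).map (fun k => (pvDelta k).2.2.2.2)).sum) := by
  induction ings generalizing acc with
  | nil => simp
  | cons x xs ih =>
    simp only [List.foldl_cons, List.map_cons, List.sum_cons, ih, pvA_step_eq_delta]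
    ring_nf

-- a sum over category indices (all ≤ 5) is the count-weighted sum of values
theorem pvSum_eq_counts (f : Nat → Int) (l : List Nat) (h : ∀ x ∈ l, x ≤ 5) :
    (l.map f).sum =
      f 0 * l.count 0 + f 1 * l.count 1 + f 2 * l.count 2 +
      f 3 * l.count 3 + f 4 * l.count 4 + f 5 * l.count 5 := by
  induction l with
  | nil => simp
  | cons x xs ih =>
    have hx : x ≤ 5 := h x (List.mem_cons_self ..)
    have ih' := ih (fun y hy => h y (List.mem_cons_of_mem _ hy))
    interval_cases x <;>
      simp [ih'] <;> ring

-- ===== VERDICT (by name: the statement is the Claim_ definition above) =====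
theorem estimate_macros_fallback_py_spec : Claim_equal_estimate_macros_fallback_py := by
  intro ingredients servings _ _
  unfold Spec_estimate_macros_fallback_py estimate_macros_fallback_py estimate_macros_fallback_py_alt
  have hle : ∀ x ∈ ingredients.map pvB_category, x ≤ 5 := by
    intro x hx
    obtain ⟨i, _, rfl⟩ := List.mem_map.mp hx
    exact pvB_category_le i
  simp only [pvA_fold_eq,
    pvSum_eq_counts (fun k => (pvDelta k).1) _ hle,
    pvSum_eq_counts (fun k => (pvDelta k).2.1) _ hle,
    pvSum_eq_counts (fun k => (pvDelta k).2.2.1) _ hle,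
    pvSum_eq_counts (fun k => (pvDelta k).2.2.2.1) _ hle,
    pvSum_eq_counts (fun k => (pvDelta k).2.2.2.2) _ hle,
    List.range_succ]
  simp [pvDelta]
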